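-- pv_equiv track=rewrite | github.com/SVCE-ACM/A-December-Of-Algorithms-2024 | December 23/Python_KishoreMuruganantham_23.py | crystal_grid_final_result
-- ===== SOURCE A (Python) =====
-- def crystal_grid_final_result(grid):
--     n = len(grid)
--     primary_sum, secondary_sum, boundary_sum = 0, 0, 0
--
--     for i in range(n):
--         primary_sum += grid[i][i]
--         secondary_sum += grid[i][n - 1 - i]
--         for j in range(n):
--             if i == 0 or i == n - 1 or j == 0 or j == n - 1:
--                 boundary_sum += grid[i][j]
--
--     diagonal_energy = abs(primary_sum - secondary_sum)
--     final_result = diagonal_energy + boundary_sum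
--     return final_result
-- ===== SOURCE B (Python) =====
-- def crystal_grid_final_result(grid):
--     n = len(grid)
--     if n == 0:
--         return 0
--     primary = sum(grid[i][i] for i in range(n))
--     secondary = sum(grid[i][n - 1 - i] for i in range(n))
--     top = sum(grid[0][:n])
--     bottom = sum(grid[n - 1][:n]) if n > 1 else 0
--     sides = sum(grid[i][0] + grid[i][n - 1] for i in range(1, n - 1))
--     return abs(primary - secondary) + top + bottom + sides
-- ===== Notes on version B (the rewrite author's own statement) =====
-- stated objective: faster
-- what changed: B replaces A's full n*n scan with direct O(n) sums: diagonals by index plus border as top-row slice, bottom-row slice and the first/last entry of each middle row.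
import Mathlib
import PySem

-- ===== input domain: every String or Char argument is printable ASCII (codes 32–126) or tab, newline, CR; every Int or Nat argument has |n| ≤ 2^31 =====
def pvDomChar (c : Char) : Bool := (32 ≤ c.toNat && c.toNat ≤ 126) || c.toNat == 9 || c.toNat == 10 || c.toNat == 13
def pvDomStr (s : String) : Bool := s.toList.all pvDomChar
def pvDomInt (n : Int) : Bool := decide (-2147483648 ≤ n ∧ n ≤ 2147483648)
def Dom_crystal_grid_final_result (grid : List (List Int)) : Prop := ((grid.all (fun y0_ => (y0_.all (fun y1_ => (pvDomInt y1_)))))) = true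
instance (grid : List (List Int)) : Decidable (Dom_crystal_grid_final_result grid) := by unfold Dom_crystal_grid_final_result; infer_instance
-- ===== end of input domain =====

-- B sums only the two diagonals and the border cells directly (top row slice, bottom row
-- slice, first/last entry of each middle row): O(n) cells touched instead of A's O(n^2) scan.

-- ===== PORT A =====
-- literal port of A: nested loops over range(n) with a triple accumulator
def crystal_grid_final_result (grid : List (List Int)) : Int :=
  let n : Int := (grid.length : Int)
  let s :=
    (PySem.List.pyRange 0 n 1).foldl
      (fun (st : Int × Int × Int) i =>
        (st.1 + PySem.List.pyGetD (PySem.List.pyGetD grid i []) i 0,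
         st.2.1 + PySem.List.pyGetD (PySem.List.pyGetD grid i []) (n - 1 - i) 0,
         (PySem.List.pyRange 0 n 1).foldl
           (fun b j =>
             if i = 0 ∨ i = n - 1 ∨ j = 0 ∨ j = n - 1 then
               b + PySem.List.pyGetD (PySem.List.pyGetD grid i []) j 0
             else b)
           st.2.2))
      (0, 0, 0)
  |s.1 - s.2.1| + s.2.2

-- ===== PORT B =====
-- literal port of Source B: diagonals by index, border as top slice + bottom slice + side columns
def crystal_grid_final_result_alt (grid : List (List Int)) : Int :=
  let n : Int := (grid.length : Int)
  if n = 0 then 0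
  else
    let primary :=
      (PySem.List.pyRange 0 n 1).foldl
        (fun s i => s + PySem.List.pyGetD (PySem.List.pyGetD grid i []) i 0) 0
    let secondary :=
      (PySem.List.pyRange 0 n 1).foldl
        (fun s i => s + PySem.List.pyGetD (PySem.List.pyGetD grid i []) (n - 1 - i) 0) 0
    let top := (PySem.List.slice (PySem.List.pyGetD grid 0 []) none (some n)).sum
    let bottom :=
      if 1 < n then (PySem.List.slice (PySem.List.pyGetD grid (n - 1) []) none (some n)).sum
      else 0
    let sides :=
      (PySem.List.pyRange 1 (n - 1) 1).foldl
        (fun s i =>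
          s + (PySem.List.pyGetD (PySem.List.pyGetD grid i []) 0 0 +
               PySem.List.pyGetD (PySem.List.pyGetD grid i []) (n - 1) 0)) 0
    |primary - secondary| + top + bottom + sides

-- ===== PRECONDITION & SPEC =====
-- Pre_ excludes exactly the grids on which A raises IndexError: some row shorter than len(grid).
def Pre_crystal_grid_final_result (grid : List (List Int)) : Prop :=
  ∀ row ∈ grid, grid.length ≤ row.length
instance (grid : List (List Int)) : Decidable (Pre_crystal_grid_final_result grid) := by
  unfold Pre_crystal_grid_final_result; infer_instance
def pvWitness_crystal_grid_final_result : List (List Int) := [[1, 2, 3], [4, 5, 6], [7, 8, 9]]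

def Spec_crystal_grid_final_result (grid : List (List Int)) (out : Int) : Prop := out = crystal_grid_final_result_alt grid
instance (grid : List (List Int)) (out : Int) : Decidable (Spec_crystal_grid_final_result grid out) := by unfold Spec_crystal_grid_final_result; infer_instance

-- ===== CLAIM (what is proved, stated in full; the proofs are below) =====
def Claim_equal_crystal_grid_final_result : Prop := ∀ (grid : List (List Int)), Dom_crystal_grid_final_result grid → Pre_crystal_grid_final_result grid → Spec_crystal_grid_final_result grid (crystal_grid_final_result grid)

-- ===== LEMMAS AND PROOFS =====

-- a foldl with independent product components splits into three foldls
theorem pv_foldl_triple {α : Type} (l : List α) (f g h : Int → α → Int) (a b c : Int) :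
    l.foldl (fun st x => (f st.1 x, g st.2.1 x, h st.2.2 x)) (a, b, c)
      = (l.foldl f a, l.foldl g b, l.foldl h c) := by
  induction l generalizing a b c with
  | nil => rfl
  | cons y l ih => simpa using ih (f a y) (g b y) (h c y)

-- A's guarded accumulation is an additive fold
theorem pv_foldl_if_add {α : Type} (l : List α) (p : α → Prop) [DecidablePred p]
    (v : α → Int) (b : Int) :
    l.foldl (fun b x => if p x then b + v x else b) b
      = b + (l.map (fun x => if p x then v x else 0)).sum := by
  have : (fun (b : Int) (x : α) => if p x then b + v x else b)
      = fun b x => b + (if p x then v x else 0) := by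
    funext b x; split <;> simp
  rw [this, PySem.List.foldl_add]

-- summing row[j] for j in range(n) is the sum of the first n entries
theorem pv_row_sum (row : List Int) (n : Int) (h0 : 0 ≤ n) (hn : n.toNat ≤ row.length) :
    ((PySem.List.pyRange 0 n 1).map (fun j => PySem.List.pyGetD row j 0)).sum
      = (row.take n.toNat).sum := by
  have hlen : (PySem.List.len (row.take n.toNat)) = n := by
    simp [PySem.List.len]; omega
  have hcongr : (PySem.List.pyRange 0 n 1).map (fun j => PySem.List.pyGetD row j 0)
      = (PySem.List.pyRange 0 (PySem.List.len (row.take n.toNat)) 1).map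
          (fun j => PySem.List.pyGetD (row.take n.toNat) j 0) := by
    rw [hlen]
    refine List.map_congr_left ?_
    intro j hj
    rw [PySem.List.mem_pyRange_one] at hj
    rw [PySem.List.pyGetD_eq_getElem _ _ hj.1 (by omega),
        PySem.List.pyGetD_eq_getElem _ _ hj.1 (by simp; omega)]
    exact List.getElem_take.symm
  rw [hcongr, PySem.List.map_pyGetD_pyRange_zero]

-- per-row contribution of A's boundary loop at outer index i
def pvC (grid : List (List Int)) (n i : Int) : Int :=
  ((PySem.List.pyRange 0 n 1).map
    (fun j => if i = 0 ∨ i = n - 1 ∨ j = 0 ∨ j = n - 1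
              then PySem.List.pyGetD (PySem.List.pyGetD grid i []) j 0 else 0)).sum

theorem pv_row_len (grid : List (List Int)) (hpre : Pre_crystal_grid_final_result grid)
    (i : Int) (h0 : 0 ≤ i) (h1 : i < (grid.length : Int)) :
    grid.length ≤ (PySem.List.pyGetD grid i []).length := by
  rw [PySem.List.pyGetD_eq_getElem _ _ h0 h1]
  exact hpre _ (List.getElem_mem _)

-- edge rows (i = 0 or i = n-1): every column counts, the row sum of the first n entries
theorem pv_C_edge (grid : List (List Int)) (n i : Int)
    (hi : i = 0 ∨ i = n - 1)
    (hlen : n.toNat ≤ (PySem.List.pyGetD grid i []).length) (h0 : 0 ≤ n) :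
    pvC grid n i = ((PySem.List.pyGetD grid i []).take n.toNat).sum := by
  unfold pvC
  rw [List.map_congr_left (fun j _ => if_pos (by tauto))]
  exact pv_row_sum _ _ h0 hlen

-- middle rows: only columns 0 and n-1 count
theorem pv_C_mid (grid : List (List Int)) (n i : Int)
    (hi1 : 1 ≤ i) (hi2 : i ≤ n - 2) :
    pvC grid n i = PySem.List.pyGetD (PySem.List.pyGetD grid i []) 0 0 +
                   PySem.List.pyGetD (PySem.List.pyGetD grid i []) (n - 1) 0 := by
  unfold pvC
  rw [PySem.List.pyRange_one_append 0 1 n (by omega) (by omega),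
      PySem.List.pyRange_one_append 1 (n - 1) n (by omega) (by omega)]
  have h1 : PySem.List.pyRange 0 1 1 = [0] := by decide
  have h2 : PySem.List.pyRange (n - 1) n 1 = [n - 1] := by
    rw [PySem.List.pyRange_one_cons (by omega : n - 1 < n),
        PySem.List.pyRange_one_eq_nil (by omega : n ≤ n - 1 + 1)]
  rw [h1, h2]
  simp only [List.map_append, List.sum_append, List.map_cons, List.map_nil,
    List.sum_cons, List.sum_nil]
  simp only [true_or, or_true, if_true]
  have hmid : ((PySem.List.pyRange 1 (n - 1) 1).map
      (fun j => if i = 0 ∨ i = n - 1 ∨ j = 0 ∨ j = n - 1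
                then PySem.List.pyGetD (PySem.List.pyGetD grid i []) j 0 else 0)).sum = 0 := by
    apply List.sum_eq_zero
    intro x hx
    simp only [List.mem_map] at hx
    obtain ⟨j, hj, rfl⟩ := hx
    rw [PySem.List.mem_pyRange_one] at hj
    rw [if_neg (by omega)]
  rw [hmid]
  ring

-- ===== VERDICT (by name: the statement is the Claim_ definition above) =====
theorem crystal_grid_final_result_spec : Claim_equal_crystal_grid_final_result := by
  intro grid _ hpre
  unfold Spec_crystal_grid_final_result
  by_cases hz : grid.length = 0
  · rw [List.length_eq_zero_iff] at hz
    subst hz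
    rfl
  · have hn : 1 ≤ (grid.length : Int) := by omega
    simp only [crystal_grid_final_result, crystal_grid_final_result_alt]
    rw [if_neg (by omega : ¬ ((grid.length : Int) = 0))]
    rw [pv_foldl_triple (PySem.List.pyRange 0 ((grid.length : Int)) 1)
      (fun s i => s + PySem.List.pyGetD (PySem.List.pyGetD grid i []) i 0)
      (fun s i => s + PySem.List.pyGetD (PySem.List.pyGetD grid i []) ((grid.length : Int) - 1 - i) 0)
      (fun b i => (PySem.List.pyRange 0 ((grid.length : Int)) 1).foldl
        (fun b j => if i = 0 ∨ i = (grid.length : Int) - 1 ∨ j = 0 ∨ j = (grid.length : Int) - 1 then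
            b + PySem.List.pyGetD (PySem.List.pyGetD grid i []) j 0
          else b) b)
      0 0 0]
    have hB : (PySem.List.pyRange 0 ((grid.length : Int)) 1).foldl
      (fun b i => (PySem.List.pyRange 0 ((grid.length : Int)) 1).foldl
        (fun b j => if i = 0 ∨ i = (grid.length : Int) - 1 ∨ j = 0 ∨ j = (grid.length : Int) - 1 then
            b + PySem.List.pyGetD (PySem.List.pyGetD grid i []) j 0
          else b) b) 0
      = ((PySem.List.pyRange 0 ((grid.length : Int)) 1).map (pvC grid (grid.length : Int))).sum := by
      have hfun : (fun (b : Int) (i : Int) => (PySem.List.pyRange 0 ((grid.length : Int)) 1).foldl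
          (fun b j => if i = 0 ∨ i = (grid.length : Int) - 1 ∨ j = 0 ∨ j = (grid.length : Int) - 1 then
              b + PySem.List.pyGetD (PySem.List.pyGetD grid i []) j 0
            else b) b)
          = fun b i => b + pvC grid (grid.length : Int) i := by
        funext b i
        exact pv_foldl_if_add _ _ _ b
      rw [hfun, PySem.List.foldl_add]
      simp
    rw [hB]
    dsimp only
    have hbd : (List.map (pvC grid (grid.length : Int)) (PySem.List.pyRange 0 ((grid.length : Int)) 1)).sum
        = (PySem.List.slice (PySem.List.pyGetD grid 0 []) none (some ((grid.length : Int)))).sum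
          + (if 1 < ((grid.length : Int)) then
              (PySem.List.slice (PySem.List.pyGetD grid (((grid.length : Int)) - 1) []) none (some ((grid.length : Int)))).sum
            else 0)
          + (PySem.List.pyRange 1 (((grid.length : Int)) - 1) 1).foldl
              (fun s i => s + (PySem.List.pyGetD (PySem.List.pyGetD grid i []) 0 0 +
                 PySem.List.pyGetD (PySem.List.pyGetD grid i []) (((grid.length : Int)) - 1) 0)) 0 := by
      have hlen0 : ((grid.length : Int)).toNat ≤ (PySem.List.pyGetD grid 0 []).length := by
        have := pv_row_len grid hpre 0 (by omega) (by omega)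
        omega
      have htop : PySem.List.slice (PySem.List.pyGetD grid 0 []) none (some ((grid.length : Int)))
          = (PySem.List.pyGetD grid 0 []).take ((grid.length : Int)).toNat :=
        PySem.List.slice_to _ (by omega)
      by_cases h1 : grid.length = 1
      · have hr : PySem.List.pyRange 0 ((grid.length : Int)) 1 = [0] := by
          rw [h1]; decide
        have hr2 : PySem.List.pyRange 1 (((grid.length : Int)) - 1) 1 = [] := by
          apply PySem.List.pyRange_one_eq_nil; omega
        rw [hr, hr2, htop, if_neg (by omega : ¬ (1 < ((grid.length : Int))))]
        simp only [List.map_cons, List.map_nil, List.sum_cons, List.sum_nil, List.foldl_nil]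
        rw [pv_C_edge grid _ 0 (Or.inl rfl) hlen0 (by omega)]
        ring
      · -- grid.length ≥ 2
        have hlenl : ((grid.length : Int)).toNat ≤ (PySem.List.pyGetD grid (((grid.length : Int)) - 1) []).length := by
          have := pv_row_len grid hpre (((grid.length : Int)) - 1) (by omega) (by omega)
          omega
        have hbot : PySem.List.slice (PySem.List.pyGetD grid (((grid.length : Int)) - 1) []) none (some ((grid.length : Int)))
            = (PySem.List.pyGetD grid (((grid.length : Int)) - 1) []).take ((grid.length : Int)).toNat :=
          PySem.List.slice_to _ (by omega)
        rw [PySem.List.pyRange_one_append 0 1 ((grid.length : Int)) (by omega) (by omega),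
            PySem.List.pyRange_one_append 1 (((grid.length : Int)) - 1) ((grid.length : Int)) (by omega) (by omega)]
        have hr0 : PySem.List.pyRange 0 1 1 = [0] := by decide
        have hrl : PySem.List.pyRange (((grid.length : Int)) - 1) ((grid.length : Int)) 1 = [((grid.length : Int)) - 1] := by
          rw [PySem.List.pyRange_one_cons (by omega : ((grid.length : Int)) - 1 < ((grid.length : Int))),
              PySem.List.pyRange_one_eq_nil (by omega : ((grid.length : Int)) ≤ ((grid.length : Int)) - 1 + 1)]
        rw [hr0, hrl, htop, hbot, if_pos (by omega : 1 < ((grid.length : Int)))]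
        have hmid : List.map (pvC grid ((grid.length : Int))) (PySem.List.pyRange 1 (((grid.length : Int)) - 1) 1)
            = List.map (fun i => PySem.List.pyGetD (PySem.List.pyGetD grid i []) 0 0 +
                PySem.List.pyGetD (PySem.List.pyGetD grid i []) (((grid.length : Int)) - 1) 0)
                (PySem.List.pyRange 1 (((grid.length : Int)) - 1) 1) := by
          refine List.map_congr_left ?_
          intro i hi
          rw [PySem.List.mem_pyRange_one] at hi
          exact pv_C_mid grid _ i (by omega) (by omega)
        rw [PySem.List.foldl_add]
        simp only [List.map_append, List.sum_append, List.map_cons, List.map_nil,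
          List.sum_cons, List.sum_nil, hmid]
        rw [pv_C_edge grid _ 0 (Or.inl rfl) hlen0 (by omega),
            pv_C_edge grid _ (((grid.length : Int)) - 1) (Or.inr rfl) hlenl (by omega)]
        ring
    rw [hbd]
    ring
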